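-- pv_equiv track=rewrite | github.com/UndiFineD/DebVisor | scripts/license_header_check.py | header_for_extension
-- ===== SOURCE A (Python) =====
-- HASH_PREFIX_EXTS = {
--     ".py",
--     ".sh",
--     ".bash",
--     ".ps1",
--     ".psm1",
--     ".psd1",
--     ".rb",
--     ".pl",
--     ".yml",
--     ".yaml",
-- }
--
-- SLASH_PREFIX_EXTS = {
--     ".go",
--     ".rs",
--     ".kt",
--     ".kts",
--     ".php",
-- }
--
-- BLOCK_COMMENT_EXTS = {
--     ".c",
--     ".h",
--     ".cpp",
--     ".cc",
--     ".cxx",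
--     ".cs",
--     ".js",
--     ".ts",
--     ".tsx",
--     ".java",
--     ".scala",
--     ".swift",
--     ".css",
-- }
--
-- LINE_TEMPLATE = [
--     "{prefix} Copyright (c) 2025 DebVisor contributors",
--     "{prefix} Licensed under the Apache License, Version 2.0 (the \"License\");",
--     "{prefix} you may not use this file except in compliance with the License.",
--     "{prefix} You may obtain a copy of the License at",
--     "{prefix}     http://www.apache.org/licenses/LICENSE-2.0",
--     "{prefix} Unless required by applicable law or agreed to in writing, software",
--     "{prefix} distributed under the License is distributed on an \"AS IS\" BASIS,",
--     "{prefix} WITHOUT WARRANTIES OR CONDITIONS OF ANY KIND, either express or implied.",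
--     "{prefix} See the License for the specific language governing permissions and",
--     "{prefix} limitations under the License.",
-- ]
--
-- BLOCK_TEMPLATE = [
--     "/*",
--     " * Copyright (c) 2025 DebVisor contributors",
--     " * Licensed under the Apache License, Version 2.0 (the \"License\");",
--     " * you may not use this file except in compliance with the License.",
--     " * You may obtain a copy of the License at",
--     " *     http://www.apache.org/licenses/LICENSE-2.0",
--     " * Unless required by applicable law or agreed to in writing, software",
--     " * distributed under the License is distributed on an \"AS IS\" BASIS,",
--     " * WITHOUT WARRANTIES OR CONDITIONS OF ANY KIND, either express or implied.",
--     " * See the License for the specific language governing permissions and",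
--     " * limitations under the License.",
--     " */",
-- ]
--
-- def header_for_extension(ext: str) -> list[str] | None:
--     if ext in HASH_PREFIX_EXTS:
--         return [line.format(prefix="#") for line in LINE_TEMPLATE]
--     if ext in SLASH_PREFIX_EXTS:
--         return [line.format(prefix="//") for line in LINE_TEMPLATE]
--     if ext in BLOCK_COMMENT_EXTS:
--         return BLOCK_TEMPLATE
--     return None
-- ===== SOURCE B (Python) =====
-- # B: precompute one extension->header table at module load; the function is a single dict lookup.
-- # (Returned lists are shared module-level objects rather than fresh copies; values compare ==.)
--
-- HASH_PREFIX_EXTS = {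
--     ".py", ".sh", ".bash", ".ps1", ".psm1", ".psd1", ".rb", ".pl", ".yml", ".yaml",
-- }
--
-- SLASH_PREFIX_EXTS = {".go", ".rs", ".kt", ".kts", ".php"}
--
-- BLOCK_COMMENT_EXTS = {
--     ".c", ".h", ".cpp", ".cc", ".cxx", ".cs", ".js", ".ts", ".tsx", ".java",
--     ".scala", ".swift", ".css",
-- }
--
-- LINE_TEMPLATE = [
--     "{prefix} Copyright (c) 2025 DebVisor contributors",
--     "{prefix} Licensed under the Apache License, Version 2.0 (the \"License\");",
--     "{prefix} you may not use this file except in compliance with the License.",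
--     "{prefix} You may obtain a copy of the License at",
--     "{prefix}     http://www.apache.org/licenses/LICENSE-2.0",
--     "{prefix} Unless required by applicable law or agreed to in writing, software",
--     "{prefix} distributed under the License is distributed on an \"AS IS\" BASIS,",
--     "{prefix} WITHOUT WARRANTIES OR CONDITIONS OF ANY KIND, either express or implied.",
--     "{prefix} See the License for the specific language governing permissions and",
--     "{prefix} limitations under the License.",
-- ]
--
-- BLOCK_TEMPLATE = [
--     "/*",
--     " * Copyright (c) 2025 DebVisor contributors",
--     " * Licensed under the Apache License, Version 2.0 (the \"License\");",
--     " * you may not use this file except in compliance with the License.",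
--     " * You may obtain a copy of the License at",
--     " *     http://www.apache.org/licenses/LICENSE-2.0",
--     " * Unless required by applicable law or agreed to in writing, software",
--     " * distributed under the License is distributed on an \"AS IS\" BASIS,",
--     " * WITHOUT WARRANTIES OR CONDITIONS OF ANY KIND, either express or implied.",
--     " * See the License for the specific language governing permissions and",
--     " * limitations under the License.",
--     " */",
-- ]
--
-- _HASH_HEADER = [line.format(prefix="#") for line in LINE_TEMPLATE]
-- _SLASH_HEADER = [line.format(prefix="//") for line in LINE_TEMPLATE]
--
-- _TABLE = {}
-- for _e in BLOCK_COMMENT_EXTS: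
--     _TABLE[_e] = BLOCK_TEMPLATE
-- for _e in SLASH_PREFIX_EXTS:
--     _TABLE[_e] = _SLASH_HEADER
-- for _e in HASH_PREFIX_EXTS:
--     _TABLE[_e] = _HASH_HEADER
--
--
-- def header_for_extension(ext: str) -> list[str] | None:
--     return _TABLE.get(ext)
-- ===== Notes on version B (the rewrite author's own statement) =====
-- stated objective: idiomatic
-- what changed: Replaced the three-branch set-membership-plus-on-demand-formatting chain by a single precomputed extension-to-header dict built once at module load, so the function body is one _TABLE.get(ext) with no branches or per-call formatting.
import Mathlib
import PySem

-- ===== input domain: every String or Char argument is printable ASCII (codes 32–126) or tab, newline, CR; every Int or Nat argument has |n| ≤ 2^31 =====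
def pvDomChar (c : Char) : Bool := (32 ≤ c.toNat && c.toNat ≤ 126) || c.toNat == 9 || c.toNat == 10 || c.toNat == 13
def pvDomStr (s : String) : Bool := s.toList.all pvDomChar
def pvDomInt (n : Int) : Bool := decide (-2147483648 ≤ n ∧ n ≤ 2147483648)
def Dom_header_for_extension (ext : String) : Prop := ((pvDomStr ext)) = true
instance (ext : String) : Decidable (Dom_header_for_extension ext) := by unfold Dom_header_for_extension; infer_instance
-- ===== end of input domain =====

-- B precomputes one extension→header table once; the function body is a single table lookup
-- (A's return-value behaviour only; A returns a fresh list per call, B a shared one).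

-- shared module constants (same-module context of both programs)
def lineTemplate : List String :=
  [ "{prefix} Copyright (c) 2025 DebVisor contributors",
    "{prefix} Licensed under the Apache License, Version 2.0 (the \"License\");",
    "{prefix} you may not use this file except in compliance with the License.",
    "{prefix} You may obtain a copy of the License at",
    "{prefix}     http://www.apache.org/licenses/LICENSE-2.0",
    "{prefix} Unless required by applicable law or agreed to in writing, software",
    "{prefix} distributed under the License is distributed on an \"AS IS\" BASIS,",
    "{prefix} WITHOUT WARRANTIES OR CONDITIONS OF ANY KIND, either express or implied.",
    "{prefix} See the License for the specific language governing permissions and",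
    "{prefix} limitations under the License." ]

def blockTemplate : List String :=
  [ "/*",
    " * Copyright (c) 2025 DebVisor contributors",
    " * Licensed under the Apache License, Version 2.0 (the \"License\");",
    " * you may not use this file except in compliance with the License.",
    " * You may obtain a copy of the License at",
    " *     http://www.apache.org/licenses/LICENSE-2.0",
    " * Unless required by applicable law or agreed to in writing, software",
    " * distributed under the License is distributed on an \"AS IS\" BASIS,",
    " * WITHOUT WARRANTIES OR CONDITIONS OF ANY KIND, either express or implied.",
    " * See the License for the specific language governing permissions and",
    " * limitations under the License.",
    " */" ]

def hashExtsList : List String :=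
  [".py", ".sh", ".bash", ".ps1", ".psm1", ".psd1", ".rb", ".pl", ".yml", ".yaml"]

def slashExtsList : List String := [".go", ".rs", ".kt", ".kts", ".php"]

def blockExtsList : List String :=
  [".c", ".h", ".cpp", ".cc", ".cxx", ".cs", ".js", ".ts", ".tsx", ".java", ".scala", ".swift", ".css"]

-- ===== PORT A =====
def hashPrefixExts : PySem.Set String := PySem.Set.ofList hashExtsList
def slashPrefixExts : PySem.Set String := PySem.Set.ofList slashExtsList
def blockCommentExts : PySem.Set String := PySem.Set.ofList blockExtsList

-- '{prefix}' is the only format field in every template line, so line.format(prefix=p)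
-- is exactly replacement of the substring "{prefix}" by p (exact here).
def formatPrefix (line : String) (p : String) : String := PySem.Str.replace line "{prefix}" p

def header_for_extension (ext : String) : Option (List String) :=
  if PySem.Set.contains hashPrefixExts ext then
    some (lineTemplate.map (fun line => formatPrefix line "#"))
  else if PySem.Set.contains slashPrefixExts ext then
    some (lineTemplate.map (fun line => formatPrefix line "//"))
  else if PySem.Set.contains blockCommentExts ext then
    some blockTemplate
  else none

-- ===== PORT B =====
def hashHeader : List String := lineTemplate.map (fun line => PySem.Str.replace line "{prefix}" "#")
def slashHeader : List String := lineTemplate.map (fun line => PySem.Str.replace line "{prefix}" "//")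

-- _TABLE: three insertion loops over the extension lists (block, then slash, then hash)
def headerTable : PySem.Dict String (List String) :=
  hashExtsList.foldl (fun d e => d.insert e hashHeader)
    (slashExtsList.foldl (fun d e => d.insert e slashHeader)
      (blockExtsList.foldl (fun d e => d.insert e blockTemplate) PySem.Dict.empty))

def header_for_extension_alt (ext : String) : Option (List String) :=
  headerTable.get? ext

-- ===== PRECONDITION & SPEC =====
def Spec_header_for_extension (ext : String) (out : Option (List String)) : Prop := out = header_for_extension_alt ext
instance (ext : String) (out : Option (List String)) : Decidable (Spec_header_for_extension ext out) := by unfold Spec_header_for_extension; infer_instance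

-- ===== CLAIM (what is proved, stated in full; the proofs are below) =====
def Claim_equal_header_for_extension : Prop := ∀ (ext : String), Dom_header_for_extension ext → Spec_header_for_extension ext (header_for_extension ext)

-- ===== LEMMAS AND PROOFS =====

-- a fold inserting the same value v at every key of ks: lookup is "if x ∈ ks then v else old"
theorem get?_foldl_insert_const {V : Type} (ks : List String) (v : V)
    (d : PySem.Dict String V) (x : String) :
    (ks.foldl (fun d e => d.insert e v) d).get? x
      = if x ∈ ks then some v else d.get? x := by
  induction ks generalizing d with
  | nil => simp
  | cons k ks ih =>
    simp only [List.foldl_cons, ih, PySem.Dict.get?_insert, List.mem_cons]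
    by_cases hx : x ∈ ks <;> by_cases hk : x = k <;> simp [hx, hk]

theorem header_for_extension_eq_alt (ext : String) :
    header_for_extension ext = header_for_extension_alt ext := by
  unfold header_for_extension header_for_extension_alt headerTable
  rw [get?_foldl_insert_const, get?_foldl_insert_const, get?_foldl_insert_const]
  simp only [hashPrefixExts, slashPrefixExts, blockCommentExts,
    PySem.Set.contains_eq_listContains, PySem.Set.ofList, PySem.Dict.get?_empty,
    formatPrefix, hashHeader, slashHeader]
  by_cases h1 : ext ∈ hashExtsList <;> by_cases h2 : ext ∈ slashExtsList <;>
    by_cases h3 : ext ∈ blockExtsList <;>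
    simp_all [hashExtsList, slashExtsList, blockExtsList]

-- ===== VERDICT (by name: the statement is the Claim_ definition above) =====
theorem header_for_extension_spec : Claim_equal_header_for_extension := by
  intro ext _
  exact header_for_extension_eq_alt ext
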